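-- pv_equiv track=rewrite | github.com/fhswf/MLPro | src/mlpro/gt/pool/native/games/routingproblems_3p.py | _custom_function
-- ===== SOURCE A (Python) =====
-- def _custom_function(p_input, p_range=None):
--
--     path = {
--         1 : ['S','1','2','3','T'],
--         2 : ['S','1','3','T'],
--         3 : ['S','1','2','4','3','T'],
--         4 : ['S','1','2','4','T'],
--         5 : ['S','2','4','T'],
--         6 : ['S','2','4','3','T'],
--         7 : ['S','2','3','T']
--     }
--
--     time_matrix = {
--         'S_1' : [4,6,10],
--         'S_2' : [3,4,5],
--         '1_2' : [1,2,5],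
--         '1_3' : [3,5,6],
--         '2_3' : [4,5,6],
--         '2_4' : [3,6,9],
--         '3_T' : [2,4,6],
--         '4_3' : [1,2,7],
--         '4_T' : [2,8,10]
--     }
--
--     time = [0, 0, 0]
--     reached = [False, False, False]
--     p_input = [int(x) for x in p_input]
--
--     n_iter = max(max(len(path[p_input[0]]), len(path[p_input[1]])), len(path[p_input[2]]))
--     for x in range(n_iter):
--         if x != 0:
--             for pl in range(3):
--                 if reached[pl] is False:
--                     pl_path = path[p_input[pl]]
--                     if pl == 0:
--                         n1_path = path[p_input[1]]
--                         n2_path = path[p_input[2]]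
--                         n1_reached = reached[1]
--                         n2_reached = reached[2]
--                     elif pl == 1:
--                         n1_path = path[p_input[0]]
--                         n2_path = path[p_input[2]]
--                         n1_reached = reached[0]
--                         n2_reached = reached[2]
--                     elif pl == 2:
--                         n1_path = path[p_input[0]]
--                         n2_path = path[p_input[1]]
--                         n1_reached = reached[0]
--                         n2_reached = reached[1]
--                     str_time = pl_path[x-1]+'_'+pl_path[x]
--
--                     if n1_reached and n2_reached:
--                         time[pl] += time_matrix[str_time][0]
--                     elif (not n1_reached) and n2_reached:
--                         if (pl_path[x-1]==n1_path[x-1]) and (pl_path[x]==n1_path[x]):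
--                             time[pl] += time_matrix[str_time][1]
--                         else:
--                             time[pl] += time_matrix[str_time][0]
--                     elif (not n2_reached) and n1_reached:
--                         if (pl_path[x-1]==n2_path[x-1]) and (pl_path[x]==n2_path[x]):
--                             time[pl] += time_matrix[str_time][1]
--                         else:
--                             time[pl] += time_matrix[str_time][0]
--                     else:
--                         if (pl_path[x-1]==n1_path[x-1]==n2_path[x-1]) and (pl_path[x]==n1_path[x]==n2_path[x]):
--                             time[pl] += time_matrix[str_time][2]
--                         elif (pl_path[x-1]==n1_path[x-1]) and (pl_path[x]==n1_path[x]):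
--                             time[pl] += time_matrix[str_time][1]
--                         elif (pl_path[x-1]==n2_path[x-1]) and (pl_path[x]==n2_path[x]):
--                             time[pl] += time_matrix[str_time][1]
--                         else:
--                             time[pl] += time_matrix[str_time][0]
--
--             for pl in range(3):
--                 if reached[pl] is False:
--                     pl_path = path[p_input[pl]]
--                     if pl_path[x] == 'T':
--                         reached[pl] = True
--
--     return time
-- ===== SOURCE B (Python) =====
-- def _custom_function(p_input, p_range=None):
--
--     path = {
--         1 : ['S','1','2','3','T'],
--         2 : ['S','1','3','T'],
--         3 : ['S','1','2','4','3','T'],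
--         4 : ['S','1','2','4','T'],
--         5 : ['S','2','4','T'],
--         6 : ['S','2','4','3','T'],
--         7 : ['S','2','3','T']
--     }
--
--     time_matrix = {
--         'S_1' : [4,6,10],
--         'S_2' : [3,4,5],
--         '1_2' : [1,2,5],
--         '1_3' : [3,5,6],
--         '2_3' : [4,5,6],
--         '2_4' : [3,6,9],
--         '3_T' : [2,4,6],
--         '4_3' : [1,2,7],
--         '4_T' : [2,8,10]
--     }
--
--     # Each player's travel time is computed independently: a rival is still
--     # on the road at step x exactly when x < len(rival_path), so no shared
--     # 'reached' state is needed.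
--     paths = [path[int(p_input[pl])] for pl in range(3)]
--     time = []
--     for pl in range(3):
--         p = paths[pl]
--         t = 0
--         for x in range(1, len(p)):
--             edge = p[x-1] + '_' + p[x]
--             congestion = sum(1 for o in range(3)
--                              if o != pl and x < len(paths[o])
--                              and paths[o][x-1] == p[x-1] and paths[o][x] == p[x])
--             t += time_matrix[edge][congestion]
--         time.append(t)
--     return time
-- ===== Notes on version B (the rewrite author's own statement) =====
-- stated objective: simpler
-- what changed: Replaces the lockstep step loop with shared mutable reached/time state and a five-way branch cascade by an independent per-player sum over its own path edges, where congestion is just a count of other players whose paths are still long enough and share the same edge.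
import Mathlib
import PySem

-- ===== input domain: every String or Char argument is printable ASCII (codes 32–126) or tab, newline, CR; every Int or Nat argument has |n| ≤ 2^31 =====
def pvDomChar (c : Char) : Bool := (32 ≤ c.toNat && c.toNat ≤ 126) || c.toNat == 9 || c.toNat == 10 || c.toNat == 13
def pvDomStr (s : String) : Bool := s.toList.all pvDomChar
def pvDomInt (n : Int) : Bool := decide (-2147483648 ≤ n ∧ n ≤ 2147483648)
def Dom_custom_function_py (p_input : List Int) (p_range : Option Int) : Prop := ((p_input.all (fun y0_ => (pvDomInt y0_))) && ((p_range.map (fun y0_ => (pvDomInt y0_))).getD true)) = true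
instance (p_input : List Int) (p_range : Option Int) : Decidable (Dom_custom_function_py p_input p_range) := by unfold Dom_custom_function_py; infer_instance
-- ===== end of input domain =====

-- B computes each player's travel time independently (a rival is active at step x iff
-- x < its path length, replacing A's shared `reached` state and branch cascade by a
-- congestion count); objective: simpler.


-- ===== PORT A =====
-- the fixed `path` dict; keys outside 1..7 raise KeyError in Python (excluded by Pre_),
-- the [] default is never reached on Pre_
def pvPath (i : Int) : List String :=
  if i = 1 then ["S","1","2","3","T"]
  else if i = 2 then ["S","1","3","T"]
  else if i = 3 then ["S","1","2","4","3","T"]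
  else if i = 4 then ["S","1","2","4","T"]
  else if i = 5 then ["S","2","4","T"]
  else if i = 6 then ["S","2","4","3","T"]
  else if i = 7 then ["S","2","3","T"]
  else []

-- the fixed `time_matrix` dict; on Pre_ only its real keys are ever looked up
def pvTM (s : String) : List Int :=
  if s = "S_1" then [4,6,10]
  else if s = "S_2" then [3,4,5]
  else if s = "1_2" then [1,2,5]
  else if s = "1_3" then [3,5,6]
  else if s = "2_3" then [4,5,6]
  else if s = "2_4" then [3,6,9]
  else if s = "3_T" then [2,4,6]
  else if s = "4_3" then [1,2,7]
  else if s = "4_T" then [2,8,10]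
  else []

-- literal port of A: lockstep loop over steps, per-step cost pass then reached pass,
-- state (time, reached) as lists; p_input[pl] via getD (IndexError cases excluded by Pre_)
def custom_function_py (p_input : List Int) (p_range : Option Int) : List Int :=
  let i0 := p_input.getD 0 0
  let i1 := p_input.getD 1 0
  let i2 := p_input.getD 2 0
  let n_iter := max (max (pvPath i0).length (pvPath i1).length) (pvPath i2).length
  let res := (List.range n_iter).foldl (fun (st : List Int × List Bool) x =>
    if x ≠ 0 then
      let st1 := (List.range 3).foldl (fun (st : List Int × List Bool) pl =>
        let time := st.1
        let reached := st.2
        if reached.getD pl false = false then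
          let pli := if pl = 0 then i0 else if pl = 1 then i1 else i2
          let pl_path := pvPath pli
          let n1_path := pvPath (if pl = 0 then i1 else i0)
          let n2_path := pvPath (if pl = 2 then i1 else i2)
          let n1_reached := reached.getD (if pl = 0 then 1 else 0) false
          let n2_reached := reached.getD (if pl = 2 then 1 else 2) false
          let str_time := pl_path.getD (x-1) "" ++ "_" ++ pl_path.getD x ""
          let inc :=
            if n1_reached && n2_reached then (pvTM str_time).getD 0 0
            else if (!n1_reached) && n2_reached then
              if pl_path.getD (x-1) "" = n1_path.getD (x-1) "" ∧ pl_path.getD x "" = n1_path.getD x "" then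
                (pvTM str_time).getD 1 0
              else (pvTM str_time).getD 0 0
            else if (!n2_reached) && n1_reached then
              if pl_path.getD (x-1) "" = n2_path.getD (x-1) "" ∧ pl_path.getD x "" = n2_path.getD x "" then
                (pvTM str_time).getD 1 0
              else (pvTM str_time).getD 0 0
            else
              if (pl_path.getD (x-1) "" = n1_path.getD (x-1) "" ∧ n1_path.getD (x-1) "" = n2_path.getD (x-1) "")
                 ∧ (pl_path.getD x "" = n1_path.getD x "" ∧ n1_path.getD x "" = n2_path.getD x "") then
                (pvTM str_time).getD 2 0
              else if pl_path.getD (x-1) "" = n1_path.getD (x-1) "" ∧ pl_path.getD x "" = n1_path.getD x "" then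
                (pvTM str_time).getD 1 0
              else if pl_path.getD (x-1) "" = n2_path.getD (x-1) "" ∧ pl_path.getD x "" = n2_path.getD x "" then
                (pvTM str_time).getD 1 0
              else (pvTM str_time).getD 0 0
          (time.set pl (time.getD pl 0 + inc), reached)
        else st) st
      (List.range 3).foldl (fun (st : List Int × List Bool) pl =>
        let reached := st.2
        if reached.getD pl false = false then
          let pli := if pl = 0 then i0 else if pl = 1 then i1 else i2
          if (pvPath pli).getD x "" = "T" then (st.1, reached.set pl true) else st
        else st) st1
    else st) ([0,0,0], [false,false,false])
  res.1

-- ===== PORT B =====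
-- literal port of Source B: per-player independent sum over its own path's edges,
-- congestion = number of other players still active and on the same edge
def custom_function_py_alt (p_input : List Int) (p_range : Option Int) : List Int :=
  let paths := [pvPath (p_input.getD 0 0), pvPath (p_input.getD 1 0), pvPath (p_input.getD 2 0)]
  (List.range 3).map (fun pl =>
    let p := paths.getD pl []
    (List.range' 1 (p.length - 1)).foldl (fun t x =>
      let edge := p.getD (x-1) "" ++ "_" ++ p.getD x ""
      let congestion := ((List.range 3).filter (fun o =>
        o ≠ pl && decide (x < (paths.getD o []).length)
          && (paths.getD o []).getD (x-1) "" == p.getD (x-1) ""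
          && (paths.getD o []).getD x "" == p.getD x "")).length
      t + (pvTM edge).getD congestion 0) 0)

-- ===== PRECONDITION & SPEC =====
-- Pre_ excludes exactly the inputs where A raises: lists shorter than 3 (IndexError)
-- and first-three entries outside the path keys 1..7 (KeyError).
def Pre_custom_function_py (p_input : List Int) (p_range : Option Int) : Prop :=
  3 ≤ p_input.length ∧
  p_input.getD 0 0 ∈ ([1,2,3,4,5,6,7] : List Int) ∧
  p_input.getD 1 0 ∈ ([1,2,3,4,5,6,7] : List Int) ∧
  p_input.getD 2 0 ∈ ([1,2,3,4,5,6,7] : List Int)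
instance (p_input : List Int) (p_range : Option Int) : Decidable (Pre_custom_function_py p_input p_range) := by unfold Pre_custom_function_py; infer_instance

def pvWitness_custom_function_py : List Int × Option Int := ([1, 2, 3], none)

def Spec_custom_function_py (p_input : List Int) (p_range : Option Int) (out : List Int) : Prop := out = custom_function_py_alt p_input p_range
instance (p_input : List Int) (p_range : Option Int) (out : List Int) : Decidable (Spec_custom_function_py p_input p_range out) := by unfold Spec_custom_function_py; infer_instance

-- ===== CLAIM (what is proved, stated in full; the proofs are below) =====
def Claim_equal_custom_function_py : Prop := ∀ (p_input : List Int) (p_range : Option Int), Dom_custom_function_py p_input p_range → Pre_custom_function_py p_input p_range → Spec_custom_function_py p_input p_range (custom_function_py p_input p_range)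

-- ===== LEMMAS AND PROOFS =====
-- both ports depend on p_input only through its first three entries
lemma portA_factor (p_input : List Int) (p_range : Option Int) :
    custom_function_py p_input p_range =
      custom_function_py [p_input.getD 0 0, p_input.getD 1 0, p_input.getD 2 0] none := by
  simp [custom_function_py]

lemma portB_factor (p_input : List Int) (p_range : Option Int) :
    custom_function_py_alt p_input p_range =
      custom_function_py_alt [p_input.getD 0 0, p_input.getD 1 0, p_input.getD 2 0] none := by
  simp [custom_function_py_alt]

-- finite check over the 7³ admissible triples
set_option maxRecDepth 100000 in
set_option maxHeartbeats 4000000 in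
lemma key_equal : ∀ a ∈ ([1,2,3,4,5,6,7] : List Int), ∀ b ∈ ([1,2,3,4,5,6,7] : List Int),
    ∀ c ∈ ([1,2,3,4,5,6,7] : List Int),
    custom_function_py [a,b,c] none = custom_function_py_alt [a,b,c] none := by
  decide

-- ===== VERDICT (by name: the statement is the Claim_ definition above) =====
theorem custom_function_py_spec : Claim_equal_custom_function_py := by
  intro p_input p_range _ hPre
  obtain ⟨_, h0, h1, h2⟩ := hPre
  unfold Spec_custom_function_py
  rw [portA_factor, portB_factor]
  exact key_equal _ h0 _ h1 _ h2
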